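-- pv_equiv track=rewrite | github.com/KISHAN8888/kishan-tripathi-wasserstoff-AiInternTask | pdf_processor.py | merge_short_paragraphs
-- ===== SOURCE A (Python) =====
-- def merge_short_paragraphs(paragraphs, word_threshold=150):
--     merged_paragraphs = []
--     temp_paragraph = ""
--
--     for i, para_info in enumerate(paragraphs):
--         paragraph = para_info['paragraph_text']
--         word_count = len(paragraph.split())
--
--         if word_count < word_threshold:
--             if temp_paragraph:
--                 temp_paragraph += " " + paragraph
--             else:
--                 temp_paragraph = paragraph
--         else:
--             if temp_paragraph:
--                 merged_paragraphs.append(temp_paragraph + " " + paragraph)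
--                 temp_paragraph = ""
--             else:
--                 merged_paragraphs.append(paragraph)
--
--     if temp_paragraph:
--         merged_paragraphs.append(temp_paragraph)
--
--     return merged_paragraphs
-- ===== SOURCE B (Python) =====
-- def _join(parts):
--     # left fold of Python's truthiness-aware space join
--     out = ""
--     for p in parts:
--         out = out + " " + p if out else p
--     return out
--
--
-- def merge_short_paragraphs(paragraphs, word_threshold=150):
--     # Group-at-a-time: repeatedly find the next "long" paragraph, split off
--     # everything up to and including it as one group, join each group.
--     texts = [info['paragraph_text'] for info in paragraphs]
--     merged = []
--     while texts:
--         k = next((i for i, t in enumerate(texts)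
--                   if len(t.split()) >= word_threshold), None)
--         if k is None:
--             tail = _join(texts)
--             if tail:
--                 merged.append(tail)
--             break
--         merged.append(_join(texts[:k + 1]))
--         texts = texts[k + 1:]
--     return merged
-- ===== Notes on version B (the rewrite author's own statement) =====
-- stated objective: alternative
-- what changed: Replaces A's element-at-a-time running-buffer loop (accumulate shorts, flush on each long) by a group-at-a-time pass: repeatedly find the index of the next long paragraph, split the list there, and join each group with a truthiness-aware space join.
-- outside the precondition, e.g. on merge_short_paragraphs([{'x': 'y'}], 1): A raises KeyError, B raises KeyError
import Mathlib
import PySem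

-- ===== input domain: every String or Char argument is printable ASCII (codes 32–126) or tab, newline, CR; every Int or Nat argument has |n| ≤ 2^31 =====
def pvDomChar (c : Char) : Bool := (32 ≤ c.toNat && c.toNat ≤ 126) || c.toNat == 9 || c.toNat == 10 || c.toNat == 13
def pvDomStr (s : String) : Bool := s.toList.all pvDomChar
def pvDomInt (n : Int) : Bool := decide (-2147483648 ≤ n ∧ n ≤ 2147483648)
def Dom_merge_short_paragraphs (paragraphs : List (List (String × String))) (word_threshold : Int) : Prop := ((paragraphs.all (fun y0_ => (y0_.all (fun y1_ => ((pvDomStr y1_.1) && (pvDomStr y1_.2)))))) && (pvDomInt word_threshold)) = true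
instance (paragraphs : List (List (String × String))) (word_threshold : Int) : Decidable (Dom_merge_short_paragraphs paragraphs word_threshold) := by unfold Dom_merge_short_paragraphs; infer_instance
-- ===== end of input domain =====

-- B replaces A's running-buffer flush-on-long loop by a group-at-a-time pass (find next long
-- paragraph, split the group off, join it); same cost, alternative structure.


-- ===== PORT A =====
-- para_info['paragraph_text']: first match in the association list; the KeyError case
-- (no such key) is excluded by Pre_ and totalized with "".
def pvParaText (para_info : List (String × String)) : String :=
  (((para_info.find? (fun kv => kv.1 == "paragraph_text")).map (fun kv => kv.2)).getD "")

-- the body of A's for-loop, acting on the extracted paragraph text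
def pvStepA (word_threshold : Int) (st : List String × String) (paragraph : String) :
    List String × String :=
  if ((PySem.Str.split₀ paragraph).length : Int) < word_threshold then
    if st.2 ≠ "" then (st.1, st.2 ++ " " ++ paragraph) else (st.1, paragraph)
  else
    if st.2 ≠ "" then (st.1 ++ [st.2 ++ " " ++ paragraph], "") else (st.1 ++ [paragraph], "")

def merge_short_paragraphs (paragraphs : List (List (String × String))) (word_threshold : Int) : List String :=
  let st := paragraphs.foldl
    (fun st para_info => pvStepA word_threshold st (pvParaText para_info)) ([], "")
  if st.2 ≠ "" then st.1 ++ [st.2] else st.1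

-- ===== PORT B =====
-- Source B's _join: left fold of Python's truthiness-aware space join
def pvJoin (parts : List String) : String :=
  parts.foldl (fun out p => if out ≠ "" then out ++ " " ++ p else p) ""

-- len(t.split()) >= word_threshold
def pvIsLong (word_threshold : Int) (t : String) : Bool :=
  word_threshold ≤ ((PySem.Str.split₀ t).length : Int)

-- termination helper for the while-loop recursion
theorem pvFindIdx?_lt_length {α : Type} {p : α → Bool} {xs : List α} {k : ℕ}
    (h : xs.findIdx? p = some k) : k < xs.length :=
  (List.findIdx?_eq_some_iff_findIdx_eq.mp h).1

-- Source B's while-loop: find the next long paragraph, split that group off, recurse on the rest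
def pvGroups (word_threshold : Int) (texts : List String) : List String :=
  match h : texts.findIdx? (pvIsLong word_threshold) with
  | none => if pvJoin texts ≠ "" then [pvJoin texts] else []
  | some k => pvJoin (texts.take (k + 1)) :: pvGroups word_threshold (texts.drop (k + 1))
termination_by texts.length
decreasing_by
  have hk := pvFindIdx?_lt_length h
  simp only [List.length_drop]
  omega

def merge_short_paragraphs_alt (paragraphs : List (List (String × String))) (word_threshold : Int) : List String :=
  pvGroups word_threshold (paragraphs.map pvParaText)

-- ===== PRECONDITION & SPEC =====
-- Pre_ excludes exactly the inputs where Python A raises KeyError: some para_info lacking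
-- the key 'paragraph_text'.
def Pre_merge_short_paragraphs (paragraphs : List (List (String × String))) (word_threshold : Int) : Prop :=
  (paragraphs.all (fun para_info => para_info.any (fun kv => kv.1 == "paragraph_text"))) = true
instance (paragraphs : List (List (String × String))) (word_threshold : Int) : Decidable (Pre_merge_short_paragraphs paragraphs word_threshold) := by unfold Pre_merge_short_paragraphs; infer_instance

def pvWitness_merge_short_paragraphs : (List (List (String × String))) × Int :=
  ([[("paragraph_text", "hello world")], [("paragraph_text", "a b c")]], 3)

def Spec_merge_short_paragraphs (paragraphs : List (List (String × String))) (word_threshold : Int) (out : List String) : Prop := out = merge_short_paragraphs_alt paragraphs word_threshold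
instance (paragraphs : List (List (String × String))) (word_threshold : Int) (out : List String) : Decidable (Spec_merge_short_paragraphs paragraphs word_threshold out) := by unfold Spec_merge_short_paragraphs; infer_instance

-- ===== CLAIM (what is proved, stated in full; the proofs are below) =====
def Claim_equal_merge_short_paragraphs : Prop := ∀ (paragraphs : List (List (String × String))) (word_threshold : Int), Dom_merge_short_paragraphs paragraphs word_threshold → Pre_merge_short_paragraphs paragraphs word_threshold → Spec_merge_short_paragraphs paragraphs word_threshold (merge_short_paragraphs paragraphs word_threshold)

-- ===== LEMMAS AND PROOFS =====

-- common recursive characterisation of A's buffer loop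
def pvGo (word_threshold : Int) (t : String) : List String → List String
  | [] => if t ≠ "" then [t] else []
  | p :: ps =>
    if ((PySem.Str.split₀ p).length : Int) < word_threshold then
      pvGo word_threshold (if t ≠ "" then t ++ " " ++ p else p) ps
    else (if t ≠ "" then t ++ " " ++ p else p) :: pvGo word_threshold "" ps

theorem pvFoldA_eq (wt : Int) (ts : List String) : ∀ (m : List String) (t : String),
    (if (ts.foldl (pvStepA wt) (m, t)).2 ≠ "" then
       (ts.foldl (pvStepA wt) (m, t)).1 ++ [(ts.foldl (pvStepA wt) (m, t)).2]
     else (ts.foldl (pvStepA wt) (m, t)).1) = m ++ pvGo wt t ts := by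
  induction ts with
  | nil => intro m t; simp only [List.foldl_nil, pvGo]; split_ifs <;> simp
  | cons p ps ih =>
    intro m t
    simp only [List.foldl_cons, pvGo, pvStepA]
    by_cases hs : ((PySem.Str.split₀ p).length : Int) < wt <;>
      by_cases ht : t ≠ "" <;>
        simp only [hs, ht, if_pos, if_neg, not_false_eq_true, ih, List.append_assoc,
          List.singleton_append] <;> simp_all

theorem pvJoin_append_singleton (pre : List String) (p : String) :
    pvJoin (pre ++ [p]) = if pvJoin pre ≠ "" then pvJoin pre ++ " " ++ p else p := by
  simp [pvJoin, List.foldl_append]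

theorem pvFindIdx?_prefix {p : String → Bool} (x : String) (xs : List String) :
    ∀ (pre : List String), (∀ y ∈ pre, p y = false) → p x = true →
    (pre ++ x :: xs).findIdx? p = some pre.length := by
  intro pre
  induction pre with
  | nil => intro _ hx; simp [List.findIdx?_cons, hx]
  | cons a pre ih =>
    intro hall hx
    have ha : p a = false := hall a (List.mem_cons_self)
    have := ih (fun y hy => hall y (List.mem_cons_of_mem a hy)) hx
    simp [List.findIdx?_cons, ha, this]

theorem pvGroups_eq_go (wt : Int) (ts : List String) :
    ∀ (pre : List String), (∀ x ∈ pre, pvIsLong wt x = false) →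
    pvGroups wt (pre ++ ts) = pvGo wt (pvJoin pre) ts := by
  induction ts with
  | nil =>
    intro pre hpre
    rw [List.append_nil]
    have hfind : pre.findIdx? (pvIsLong wt) = none := by
      rw [List.findIdx?_eq_none_iff]; exact hpre
    rw [pvGroups.eq_def]
    split
    · simp [pvGo]
    · rename_i k hk; rw [hfind] at hk; cases hk
  | cons p ps ih =>
    intro pre hpre
    by_cases hl : pvIsLong wt p = true
    · have hfind : (pre ++ p :: ps).findIdx? (pvIsLong wt) = some pre.length :=
        pvFindIdx?_prefix p ps pre hpre hl
      rw [pvGroups.eq_def]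
      split
      · simp_all
      · rename_i k hk
        have hkk : k = pre.length := by rw [hfind] at hk; exact (Option.some.inj hk).symm
        subst hkk
        have htake : (pre ++ p :: ps).take (pre.length + 1) = pre ++ [p] := by
          simp [List.take_append]
        have hdrop : (pre ++ p :: ps).drop (pre.length + 1) = ps := by
          simp [List.drop_append]
        rw [htake, hdrop, pvJoin_append_singleton]
        have hrec : pvGroups wt ps = pvGo wt "" ps := by
          have := ih [] (by simp)
          simpa [pvJoin] using this
        have hwc : ¬ (((PySem.Str.split₀ p).length : Int) < wt) := by
          simp only [pvIsLong, decide_eq_true_eq] at hl; omega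
        simp [pvGo, hwc, hrec]
    · have hwc : ((PySem.Str.split₀ p).length : Int) < wt := by
        simp only [pvIsLong, decide_eq_true_eq] at hl; omega
      have hpre' : ∀ x ∈ pre ++ [p], pvIsLong wt x = false := by
        intro x hx
        rcases List.mem_append.mp hx with h | h
        · exact hpre x h
        · simp only [List.mem_singleton] at h; subst h
          exact Bool.eq_false_iff.mpr hl
      have := ih (pre ++ [p]) hpre'
      rw [List.append_assoc] at this
      simp only [List.singleton_append] at this
      rw [this, pvJoin_append_singleton]
      simp [pvGo, hwc]

-- ===== VERDICT (by name: the statement is the Claim_ definition above) =====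
theorem merge_short_paragraphs_spec : Claim_equal_merge_short_paragraphs := by
  intro paragraphs word_threshold _ _
  unfold Spec_merge_short_paragraphs merge_short_paragraphs merge_short_paragraphs_alt
  have hmap : paragraphs.foldl
      (fun st para_info => pvStepA word_threshold st (pvParaText para_info)) ([], "") =
      (paragraphs.map pvParaText).foldl (pvStepA word_threshold) ([], "") := by
    rw [List.foldl_map]
  simp only [hmap]
  rw [pvFoldA_eq word_threshold (paragraphs.map pvParaText) [] ""]
  have := pvGroups_eq_go word_threshold (paragraphs.map pvParaText) [] (by simp)
  simp only [List.nil_append] at this ⊢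
  rw [this]
  simp [pvJoin]
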